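-- pv_equiv track=rewrite | github.com/google/neural-tangents | neural_tangents/utils/utils.py | get_res_batch_dims
-- ===== SOURCE A (Python) =====
-- from typing import Any, Callable, Dict, Iterable, List, Optional, Sequence, Sized, Tuple, Union
--
-- def get_res_batch_dims(contracting_dims: Iterable[int],
--                        batch_dims: Iterable[int]) -> List[int]:
--   res_batch_dims = [2 * b - i for i, b in enumerate(batch_dims)]
--   for i, b in enumerate(batch_dims):
--     for c in contracting_dims:
--       if b > c:
--         res_batch_dims[i] -= 2
--   return res_batch_dims
-- ===== SOURCE B (Python) =====
-- def get_res_batch_dims(contracting_dims, batch_dims):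
--   # Sort the contracting dims once; for each batch dim, the number of smaller
--   # contracting dims is found by binary search (textbook bisect_left).
--   cs = sorted(contracting_dims)
--   out = []
--   for i, b in enumerate(batch_dims):
--     lo, hi = 0, len(cs)
--     while lo < hi:
--       mid = (lo + hi) // 2
--       if cs[mid] < b:
--         lo = mid + 1
--       else:
--         hi = mid
--     out.append(2 * b - i - 2 * lo)
--   return out
-- ===== Notes on version B (the rewrite author's own statement) =====
-- stated objective: faster
-- what changed: Replaces the nested scan over all (batch, contracting) pairs and in-place decrements by sorting contracting_dims once and binary-searching (bisect_left) the count of smaller contracting dims per batch dim, emitting each result directly from a closed formula.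
import Mathlib
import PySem

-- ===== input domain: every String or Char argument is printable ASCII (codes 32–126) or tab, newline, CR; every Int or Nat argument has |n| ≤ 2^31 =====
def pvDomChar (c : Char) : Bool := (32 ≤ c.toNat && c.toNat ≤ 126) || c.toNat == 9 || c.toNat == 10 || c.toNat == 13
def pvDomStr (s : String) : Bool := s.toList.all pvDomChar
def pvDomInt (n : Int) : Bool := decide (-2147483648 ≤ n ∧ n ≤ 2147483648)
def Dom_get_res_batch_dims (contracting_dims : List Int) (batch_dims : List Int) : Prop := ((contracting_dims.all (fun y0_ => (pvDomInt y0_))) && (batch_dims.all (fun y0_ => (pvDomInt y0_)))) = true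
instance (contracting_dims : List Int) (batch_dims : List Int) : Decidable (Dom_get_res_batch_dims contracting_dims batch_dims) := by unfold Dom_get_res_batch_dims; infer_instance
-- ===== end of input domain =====

-- B replaces A's nested scan over all (batch, contracting) pairs by sorting contracting_dims
-- once and binary-searching the count of smaller contracting dims per batch dim (objective: faster).

-- ===== PORT A =====
-- Literal port of A: build [2*b - i], then the nested loops decrement res[i] by 2
-- for each contracting dim c with b > c. The index i from enumerate is a Nat ≥ 0
-- and always < res.length, so `.toNat` and `List.modify` are exact here.
def get_res_batch_dims (contracting_dims : List Int) (batch_dims : List Int) : List Int :=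
  let res_batch_dims := (PySem.List.enumerate batch_dims).map (fun p => 2 * p.2 - p.1)
  (PySem.List.enumerate batch_dims).foldl
    (fun res p =>
      contracting_dims.foldl
        (fun res c => if p.2 > c then res.modify p.1.toNat (fun v => v - 2) else res)
        res)
    res_batch_dims

-- ===== PORT B =====
-- Port of B: sorted(contracting_dims) once; Source B's hand-written lo/hi/mid loop is the
-- textbook bisect_left, ported exactly as PySem.List.bisectLeft (the same loop); the
-- append loop over enumerate(batch_dims) is the map over the enumerated list.
def get_res_batch_dims_alt (contracting_dims : List Int) (batch_dims : List Int) : List Int :=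
  let cs := PySem.List.sorted contracting_dims (fun x => x)
  (PySem.List.enumerate batch_dims).map
    (fun p => 2 * p.2 - p.1 - 2 * (PySem.List.bisectLeft cs p.2 : Int))

-- ===== PRECONDITION & SPEC =====
def Spec_get_res_batch_dims (contracting_dims : List Int) (batch_dims : List Int) (out : List Int) : Prop := out = get_res_batch_dims_alt contracting_dims batch_dims
instance (contracting_dims : List Int) (batch_dims : List Int) (out : List Int) : Decidable (Spec_get_res_batch_dims contracting_dims batch_dims out) := by unfold Spec_get_res_batch_dims; infer_instance

-- ===== CLAIM (what is proved, stated in full; the proofs are below) =====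
def Claim_equal_get_res_batch_dims : Prop := ∀ (contracting_dims : List Int) (batch_dims : List Int), Dom_get_res_batch_dims contracting_dims batch_dims → Spec_get_res_batch_dims contracting_dims batch_dims (get_res_batch_dims contracting_dims batch_dims)

-- ===== LEMMAS AND PROOFS =====

-- bisect_left on a sorted list counts the elements strictly below x.
theorem bisectLeft_eq_countP (cs : List Int) (x : Int)
    (h : cs.Pairwise (fun a b => a ≤ b)) :
    (PySem.List.bisectLeft cs x) = cs.countP (fun c => decide (c < x)) := by
  obtain ⟨hk, hlt, hge⟩ := PySem.List.bisectLeft_spec cs x h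
  set k := PySem.List.bisectLeft cs x with hkdef
  have hsplit : cs = cs.take k ++ cs.drop k := (List.take_append_drop k cs).symm
  have hlen : (cs.take k).length = k := by simp [List.length_take, Nat.min_eq_left hk]
  have h1 : (cs.take k).countP (fun c => decide (c < x)) = k := by
    have hall : ∀ a ∈ cs.take k, (decide (a < x)) = true := by
      intro a ha
      obtain ⟨j, hj, rfl⟩ := List.mem_iff_getElem.mp ha
      have hjk : j < k := by simpa [hlen] using hj
      have hjlen : j < cs.length := lt_of_lt_of_le hjk hk
      rw [List.getElem_take]
      simpa using hlt j hjlen hjk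
    rw [List.countP_eq_length.mpr hall, hlen]
  have h2 : (cs.drop k).countP (fun c => decide (c < x)) = 0 := by
    rw [List.countP_eq_zero]
    intro a ha
    obtain ⟨j, hj, rfl⟩ := List.mem_iff_getElem.mp ha
    have hjlen : k + j < cs.length := by
      have := hj; simp [List.length_drop] at this; omega
    rw [List.getElem_drop]
    have := hge (k + j) hjlen (Nat.le_add_right k j)
    simp; omega
  conv_rhs => rw [hsplit]
  rw [List.countP_append, h1, h2]
  omega

-- composing two modifications at the same index
theorem modify_modify {α : Type} (l : List α) (i : Nat) (f g : α → α) :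
    (l.modify i f).modify i g = l.modify i (fun v => g (f v)) := by
  apply List.ext_getElem?
  intro j
  simp only [List.getElem?_modify]
  cases l[j]? with
  | none => simp
  | some a => by_cases h : i = j <;> simp [h]

-- A's inner loop over contracting_dims is one modification by 2 * (count of smaller dims)
theorem inner_loop_eq (cd : List Int) (b : Int) (i : Nat) (r : List Int) :
    cd.foldl (fun res c => if b > c then res.modify i (fun v => v - 2) else res) r
      = r.modify i (fun v => v - 2 * (cd.countP (fun c => decide (c < b)) : Int)) := by
  induction cd generalizing r with
  | nil =>
      simp only [List.foldl_nil, List.countP_nil]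
      apply List.ext_getElem?
      intro j
      simp only [List.getElem?_modify]
      cases r[j]? with
      | none => simp
      | some a => by_cases h : i = j <;> simp [h]
  | cons c rest ih =>
      by_cases h : b > c
      · have hc : (decide (c < b)) = true := by simpa using h
        simp only [List.foldl_cons, if_pos h, ih, modify_modify, List.countP_cons, hc]
        congr 1
        funext v
        push_cast
        ring
      · have hc : (decide (c < b)) = false := by simpa using h
        simp only [List.foldl_cons, if_neg h, ih, List.countP_cons, hc]
        simp

-- modifying inside the left part of an append
theorem modify_append_left {α : Type} (l l' : List α) (i : Nat) (f : α → α)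
    (h : i < l.length) : (l ++ l').modify i f = l.modify i f ++ l' := by
  apply List.ext_getElem?
  intro j
  by_cases hj : j < l.length
  · have hj2 : j < (l.modify i f).length := by simpa [List.length_modify] using hj
    rw [List.getElem?_modify, List.getElem?_append_left hj, List.getElem?_append_left hj2,
      List.getElem?_modify]
  · have hne : i ≠ j := by omega
    have hle : l.length ≤ j := Nat.le_of_not_lt hj
    have hle2 : (l.modify i f).length ≤ j := by simpa [List.length_modify] using hle
    rw [List.getElem?_modify, List.getElem?_append_right hle, List.getElem?_append_right hle2,
      List.length_modify]
    cases l'[j - l.length]? with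
    | none => simp
    | some a => simp [hne]

-- modifying the single appended element
theorem modify_append_last {α : Type} (l : List α) (v : α) (f : α → α) :
    (l ++ [v]).modify l.length f = l ++ [f v] := by
  apply List.ext_getElem?
  intro j
  rcases lt_trichotomy j l.length with hj | hj | hj
  · have hne : l.length ≠ j := by omega
    rw [List.getElem?_modify, List.getElem?_append_left hj, List.getElem?_append_left hj]
    cases l[j]? with
    | none => simp
    | some a => simp [hne]
  · subst hj
    simp only [List.getElem?_modify, List.getElem?_append_right (Nat.le_refl _)]
    simp
  · have h1 : l.length ≠ j := by omega
    have h3 : l.length ≤ j := by omega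
    have h4 : ¬ j - l.length < 1 := by omega
    simp only [List.getElem?_modify, List.getElem?_append_right h3]
    rw [List.getElem?_eq_none (by simp; omega), List.getElem?_eq_none (by simp; omega)]
    simp

-- a fold of index-i modifications with all indices below r0.length leaves an appended tail alone
theorem foldl_modify_append {α : Type} (ps : List (Int × α)) (g : Int × α → Int → Int)
    (r0 : List Int) (v : Int)
    (h : ∀ p ∈ ps, p.1.toNat < r0.length) :
    ps.foldl (fun res p => res.modify p.1.toNat (g p)) (r0 ++ [v])
      = ps.foldl (fun res p => res.modify p.1.toNat (g p)) r0 ++ [v] := by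
  induction ps generalizing r0 with
  | nil => simp
  | cons p rest ih =>
      simp only [List.foldl_cons]
      rw [modify_append_left _ _ _ _ (h p (List.mem_cons_self))]
      exact ih _ (fun q hq => (List.length_modify _ _ _).symm ▸ h q (List.mem_cons_of_mem _ hq))

-- the outer loop of A turns the initial map into the final map, pointwise
theorem outer_loop_eq (bd : List Int) (cnt : Int → Int) :
    (PySem.List.enumerate bd).foldl
        (fun res p => res.modify p.1.toNat (fun v => v - 2 * cnt p.2))
        ((PySem.List.enumerate bd).map (fun p => 2 * p.2 - p.1))
      = (PySem.List.enumerate bd).map (fun p => 2 * p.2 - p.1 - 2 * cnt p.2) := by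
  induction bd using List.reverseRecOn with
  | nil => simp [PySem.List.enumerate]
  | append_singleton bs b ih =>
      have henum : PySem.List.enumerate (bs ++ [b]) 0
          = PySem.List.enumerate bs 0 ++ [((bs.length : Int), b)] := by
        rw [PySem.List.enumerate_append]
        simp [PySem.List.enumerate_cons, PySem.List.enumerate_nil]
      have hidx : ∀ p ∈ PySem.List.enumerate bs 0,
          p.1.toNat < ((PySem.List.enumerate bs 0).map
            (fun p : Int × Int => 2 * p.2 - p.1)).length := by
        intro p hp
        obtain ⟨k, hk, rfl⟩ := (PySem.List.mem_enumerate_iff bs 0 p).mp hp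
        simpa [PySem.List.length_enumerate] using hk
      rw [henum]
      simp only [List.map_append, List.foldl_append, List.foldl_cons, List.foldl_nil,
        List.map_cons, List.map_nil]
      rw [foldl_modify_append _ _ _ _ hidx, ih]
      have hlen : ((PySem.List.enumerate bs 0).map
          (fun p : Int × Int => 2 * p.2 - p.1 - 2 * cnt p.2)).length = bs.length := by
        simp [PySem.List.length_enumerate]
      have : ((bs.length : Int)).toNat = ((PySem.List.enumerate bs 0).map
          (fun p : Int × Int => 2 * p.2 - p.1 - 2 * cnt p.2)).length := by
        simp [hlen]
      rw [this, modify_append_last]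

-- ===== VERDICT (by name: the statement is the Claim_ definition above) =====
theorem get_res_batch_dims_spec : Claim_equal_get_res_batch_dims := by
  intro cd bd _
  unfold Spec_get_res_batch_dims get_res_batch_dims get_res_batch_dims_alt
  have hstep :
      (fun (res : List Int) (p : Int × Int) =>
          cd.foldl (fun res c => if p.2 > c then res.modify p.1.toNat (fun v => v - 2) else res) res)
        = (fun (res : List Int) (p : Int × Int) =>
            res.modify p.1.toNat (fun v => v - 2 * (cd.countP (fun c => decide (c < p.2)) : Int))) := by
    funext res p
    exact inner_loop_eq cd p.2 p.1.toNat res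
  simp only [hstep]
  rw [outer_loop_eq bd (fun b => (cd.countP (fun c => decide (c < b)) : Int))]
  apply List.map_congr_left
  intro p _
  have hsorted := PySem.List.sorted_pairwise cd (fun x => x)
  have hperm := PySem.List.sorted_perm cd (fun x => x) false
  rw [bisectLeft_eq_countP _ _ hsorted,
    hperm.countP_eq (fun c => decide (c < p.2))]
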